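-- pv_equiv track=rewrite | github.com/deepthitanniru/opensource | visaa_prep/isBalance ElevateBox.py | calculate_balance_array
-- ===== SOURCE A (Python) =====
-- def calculate_balance_array(arr):
--     n = len(arr)
--     balance_array = []
--     for i in range(n):
--         left_weight = sum(arr[:i])
--         right_weight = sum(arr[i+1:])
--         balance = abs(left_weight - right_weight)
--         balance_array.append(balance)
--     return balance_array
-- ===== SOURCE B (Python) =====
-- def calculate_balance_array(arr):
--     total = sum(arr)
--     balance_array = []
--     left = 0
--     for x in arr:
--         balance_array.append(abs(2 * left + x - total))
--         left += x
--     return balance_array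
-- ===== Notes on version B (the rewrite author's own statement) =====
-- stated objective: faster
-- what changed: Replaced per-index slicing and re-summation with a precomputed total and a single pass maintaining a running left sum (balance = |2*left + x - total|).
import Mathlib
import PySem

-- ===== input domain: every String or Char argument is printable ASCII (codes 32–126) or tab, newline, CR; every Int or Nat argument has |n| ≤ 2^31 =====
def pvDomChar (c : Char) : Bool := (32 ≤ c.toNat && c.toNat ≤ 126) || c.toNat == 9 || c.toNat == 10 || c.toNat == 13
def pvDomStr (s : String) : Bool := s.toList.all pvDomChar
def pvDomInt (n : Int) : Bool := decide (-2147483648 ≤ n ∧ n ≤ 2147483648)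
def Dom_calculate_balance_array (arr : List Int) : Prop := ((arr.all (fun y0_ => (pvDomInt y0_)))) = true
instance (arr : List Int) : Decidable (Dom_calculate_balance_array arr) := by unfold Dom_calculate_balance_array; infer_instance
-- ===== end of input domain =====

-- B replaces A's per-index slice-and-sum (O(n^2)) with one pass over a precomputed total (O(n)); same return values.


-- ===== PORT A =====
def calculate_balance_array (arr : List Int) : List Int :=
  let n : Int := arr.length
  (PySem.List.pyRange 0 n 1).foldl (fun balance_array i =>
    let left_weight := (PySem.List.slice arr none (some i)).sum
    let right_weight := (PySem.List.slice arr (some (i + 1)) none).sum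
    let balance := |left_weight - right_weight|
    balance_array ++ [balance]) []

-- ===== PORT B =====
def calculate_balance_array_alt (arr : List Int) : List Int :=
  let total := arr.sum
  (arr.foldl (fun (st : Int × List Int) x =>
    (st.1 + x, st.2 ++ [|2 * st.1 + x - total|])) (0, [])).2

-- ===== PRECONDITION & SPEC =====
def Spec_calculate_balance_array (arr : List Int) (out : List Int) : Prop := out = calculate_balance_array_alt arr
instance (arr : List Int) (out : List Int) : Decidable (Spec_calculate_balance_array arr out) := by unfold Spec_calculate_balance_array; infer_instance

-- ===== CLAIM (what is proved, stated in full; the proofs are below) =====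
def Claim_equal_calculate_balance_array : Prop := ∀ (arr : List Int), Dom_calculate_balance_array arr → Spec_calculate_balance_array arr (calculate_balance_array arr)

-- ===== LEMMAS AND PROOFS =====

-- common reference form: per-position balances with accumulated left sum `left` and fixed `total`
def pvSpecB (total left : Int) : List Int → List Int
  | [] => []
  | x :: xs => |2 * left + x - total| :: pvSpecB total (left + x) xs

lemma pvB_foldl (total : Int) (arr : List Int) (left : Int) (acc : List Int) :
    (arr.foldl (fun (st : Int × List Int) x =>
      (st.1 + x, st.2 ++ [|2 * st.1 + x - total|])) (left, acc)).2
    = acc ++ pvSpecB total left arr := by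
  induction arr generalizing left acc with
  | nil => simp [pvSpecB]
  | cons x xs ih => simp [List.foldl, pvSpecB, ih]

lemma pvSpecB_eq_map (arr : List Int) (left total : Int) (h : total = left + arr.sum) :
    pvSpecB total left arr
    = (List.range arr.length).map
        (fun i => |left + (arr.take i).sum - (arr.drop (i + 1)).sum|) := by
  induction arr generalizing left with
  | nil => simp [pvSpecB]
  | cons x xs ih =>
    simp only [pvSpecB, List.length_cons, List.range_succ_eq_map, List.map_cons, List.map_map]
    congr 1
    · simp only [List.take_zero, List.sum_nil, List.drop_succ_cons, List.drop_zero]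
      simp at h
      congr 1
      omega
    · rw [ih (left + x) (by simp at h; omega)]
      apply List.map_congr_left
      intro i _
      simp [add_assoc]

lemma pvA_eq_map (arr : List Int) :
    calculate_balance_array arr
    = (List.range arr.length).map
        (fun i => |(arr.take i).sum - (arr.drop (i + 1)).sum|) := by
  unfold calculate_balance_array
  rw [PySem.List.foldl_append_singleton_eq_map, PySem.List.pyRange_zero_nat, List.map_map]
  simp only [List.nil_append]
  apply List.map_congr_left
  intro i _
  simp only [Function.comp]
  rw [PySem.List.slice_to_natCast]
  have : ((i : Int) + 1) = ((i + 1 : Nat) : Int) := by push_cast; ring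
  rw [this, PySem.List.slice_from_natCast]

-- ===== VERDICT (by name: the statement is the Claim_ definition above) =====
theorem calculate_balance_array_spec : Claim_equal_calculate_balance_array := by
  intro arr _
  unfold Spec_calculate_balance_array calculate_balance_array_alt
  rw [pvB_foldl, List.nil_append, pvSpecB_eq_map arr 0 arr.sum (by ring), pvA_eq_map]
  simp
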